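-- pv_equiv track=rewrite | github.com/AcornGenetics/aquilla-main | aq_curve/pcr_curve_helpers.py | sustained_rise_index
-- ===== SOURCE A (Python) =====
-- def sustained_rise_index(ydata, threshold, min_consecutive):
--     count = 0
--     for idx, val in enumerate(ydata):
--         if val >= threshold:
--             count += 1
--             if count >= min_consecutive:
--                 return idx - min_consecutive + 1
--         else:
--             count = 0
--     return None
-- ===== SOURCE B (Python) =====
-- def sustained_rise_index(ydata, threshold, min_consecutive):
--     # scan maximal runs of values >= threshold; return the start of the
--     # first run that is long enough
--     n = len(ydata)
--     i = 0
--     while i < n: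
--         if ydata[i] >= threshold:
--             j = i
--             while j < n and ydata[j] >= threshold:
--                 j += 1
--             if j - i >= min_consecutive:
--                 return i
--             i = j
--         else:
--             i += 1
--     return None
-- ===== Notes on version B (the rewrite author's own statement) =====
-- stated objective: alternative
-- what changed: Replaces the per-element counter scan with a run-based scan: jump over each maximal run of values >= threshold, test its length once, and return the run's start index.
-- intended difference: When min_consecutive <= 0 and some value reaches the threshold, A returns f+1-min_consecutive where f is the first qualifying index (an offset past the data produced by its counter arithmetic), while B returns f, the start of the qualifying run, which is the intended answer for a degenerate run-length request. — e.g. on sustained_rise_index([5], 0, 0): A returns some 1, B returns some 0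
import Mathlib
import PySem

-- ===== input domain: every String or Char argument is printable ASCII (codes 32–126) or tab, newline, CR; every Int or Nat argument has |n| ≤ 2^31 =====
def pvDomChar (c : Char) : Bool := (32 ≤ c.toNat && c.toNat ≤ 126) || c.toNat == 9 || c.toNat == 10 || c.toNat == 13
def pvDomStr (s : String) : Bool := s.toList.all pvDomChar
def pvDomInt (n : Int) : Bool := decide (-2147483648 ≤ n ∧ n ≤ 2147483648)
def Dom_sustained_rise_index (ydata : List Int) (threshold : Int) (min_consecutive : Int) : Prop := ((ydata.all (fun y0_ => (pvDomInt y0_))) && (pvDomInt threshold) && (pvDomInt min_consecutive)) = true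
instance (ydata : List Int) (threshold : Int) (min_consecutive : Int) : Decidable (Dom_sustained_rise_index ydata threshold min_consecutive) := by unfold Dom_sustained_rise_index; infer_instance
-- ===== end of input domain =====

-- B scans maximal runs of values ≥ threshold and returns the start of the first long-enough run; alternative decomposition, same cost.

-- ===== PORT A =====
-- A's loop with the running `count`, early return on count >= min_consecutive
def srA (threshold min_consecutive : Int) : List Int → Int → Int → Option Int
  | [], _, _ => none
  | v :: rest, idx, count =>
    if v ≥ threshold then
      if count + 1 ≥ min_consecutive then some (idx - min_consecutive + 1)
      else srA threshold min_consecutive rest (idx + 1) (count + 1)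
    else srA threshold min_consecutive rest (idx + 1) 0

def sustained_rise_index (ydata : List Int) (threshold : Int) (min_consecutive : Int) : Option Int :=
  srA threshold min_consecutive ydata 0 0

-- ===== PORT B =====
-- length of the maximal prefix of values ≥ threshold (B's inner `while j < n and ydata[j] >= threshold` scan)
def runLen (threshold : Int) : List Int → Nat
  | [] => 0
  | v :: rest => if v ≥ threshold then runLen threshold rest + 1 else 0

-- B's outer loop: at a qualifying element, measure the run, test it once, return its start or jump past it
def srB (threshold min_consecutive : Int) (l : List Int) (i : Int) : Option Int :=
  match l with
  | [] => none
  | v :: rest =>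
    if h : v ≥ threshold then
      let k := runLen threshold (v :: rest)
      if (k : Int) ≥ min_consecutive then some i
      else srB threshold min_consecutive ((v :: rest).drop k) (i + k)
    else srB threshold min_consecutive rest (i + 1)
termination_by l.length
decreasing_by
  · have hr : runLen threshold (v :: rest) = runLen threshold rest + 1 := by
      simp [runLen, h]
    simp only [List.length_drop, hr, List.length_cons]
    omega
  · simp

def sustained_rise_index_alt (ydata : List Int) (threshold : Int) (min_consecutive : Int) : Option Int :=
  srB threshold min_consecutive ydata 0

-- ===== PRECONDITION & SPEC =====
-- When min_consecutive <= 0 and some value reaches the threshold, A returns f+1-min_consecutive where f is the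
-- first qualifying index (an offset past the data produced by its counter arithmetic), while B returns f, the
-- start of the qualifying run, which is the intended answer for a degenerate run-length request.
def D_sustained_rise_index (ydata : List Int) (threshold : Int) (min_consecutive : Int) : Prop :=
  min_consecutive ≤ 0 ∧ ∃ y ∈ ydata, y ≥ threshold
instance (ydata : List Int) (threshold : Int) (min_consecutive : Int) : Decidable (D_sustained_rise_index ydata threshold min_consecutive) := by unfold D_sustained_rise_index; infer_instance

def Spec_sustained_rise_index (ydata : List Int) (threshold : Int) (min_consecutive : Int) (out : Option Int) : Prop := ¬ D_sustained_rise_index ydata threshold min_consecutive → out = sustained_rise_index_alt ydata threshold min_consecutive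
instance (ydata : List Int) (threshold : Int) (min_consecutive : Int) (out : Option Int) : Decidable (Spec_sustained_rise_index ydata threshold min_consecutive out) := by unfold Spec_sustained_rise_index; infer_instance

def pvDiffWitness_sustained_rise_index : List Int × Int × Int := ([5], 0, 0)
def pvDiffWitnessOut_sustained_rise_index : (Option Int) × (Option Int) := (some 1, some 0)

-- ===== CLAIM =====
def Claim_unchanged_sustained_rise_index : Prop := ∀ (ydata : List Int) (threshold : Int) (min_consecutive : Int), Dom_sustained_rise_index ydata threshold min_consecutive → Spec_sustained_rise_index ydata threshold min_consecutive (sustained_rise_index ydata threshold min_consecutive)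
def Claim_changed_sustained_rise_index : Prop := Dom_sustained_rise_index (pvDiffWitness_sustained_rise_index.1) (pvDiffWitness_sustained_rise_index.2.1) (pvDiffWitness_sustained_rise_index.2.2) ∧ D_sustained_rise_index (pvDiffWitness_sustained_rise_index.1) (pvDiffWitness_sustained_rise_index.2.1) (pvDiffWitness_sustained_rise_index.2.2) ∧ sustained_rise_index (pvDiffWitness_sustained_rise_index.1) (pvDiffWitness_sustained_rise_index.2.1) (pvDiffWitness_sustained_rise_index.2.2) = pvDiffWitnessOut_sustained_rise_index.1 ∧ sustained_rise_index_alt (pvDiffWitness_sustained_rise_index.1) (pvDiffWitness_sustained_rise_index.2.1) (pvDiffWitness_sustained_rise_index.2.2) = pvDiffWitnessOut_sustained_rise_index.2 ∧ pvDiffWitnessOut_sustained_rise_index.1 ≠ pvDiffWitnessOut_sustained_rise_index.2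
def Claim_exact_sustained_rise_index : Prop := ∀ (ydata : List Int) (threshold : Int) (min_consecutive : Int), Dom_sustained_rise_index ydata threshold min_consecutive → D_sustained_rise_index ydata threshold min_consecutive → sustained_rise_index ydata threshold min_consecutive ≠ sustained_rise_index_alt ydata threshold min_consecutive

-- ===== LEMMAS AND PROOFS =====

-- A returns some (idx - count) once the remaining run is long enough to reach min_consecutive
theorem srA_hit (threshold mc : Int) (l : List Int) (idx count : Int)
    (hc : count < mc) (hk : (runLen threshold l : Int) ≥ mc - count) :
    srA threshold mc l idx count = some (idx - count) := by
  induction l generalizing idx count with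
  | nil => simp [runLen] at hk; omega
  | cons v rest ih =>
    by_cases hv : v ≥ threshold
    · simp only [runLen, if_pos hv] at hk
      by_cases hge : count + 1 ≥ mc
      · simp only [srA, if_pos hv, if_pos hge]
        congr 1; omega
      · simp only [srA, if_pos hv, if_neg hge]
        rw [ih (idx + 1) (count + 1) (by omega) (by push_cast at hk ⊢; omega)]
        congr 1; omega
    · simp [runLen, hv] at hk; omega

-- a too-short run never triggers A; it ends with the counter effectively reset
theorem srA_skip (threshold mc : Int) (l : List Int) (idx count : Int)
    (h0 : 0 ≤ count) (hk : count + (runLen threshold l : Int) < mc) :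
    srA threshold mc l idx count =
      srA threshold mc (l.drop (runLen threshold l)) (idx + (runLen threshold l : Int)) 0 := by
  induction l generalizing idx count with
  | nil => simp [srA, runLen]
  | cons v rest ih =>
    by_cases hv : v ≥ threshold
    · simp only [runLen, if_pos hv] at hk ⊢
      have hge : ¬ (count + 1 ≥ mc) := by push_cast at hk; omega
      simp only [srA, if_pos hv, if_neg hge, List.drop_succ_cons]
      rw [ih (idx + 1) (count + 1) (by omega) (by push_cast at hk ⊢; omega)]
      congr 1; push_cast; omega
    · simp only [runLen, if_neg hv]
      simp [srA, hv]

-- with a genuine run-length requirement (mc ≥ 1) the two loops agree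
theorem srA_eq_srB (threshold mc : Int) (hmc : 1 ≤ mc) (l : List Int) (idx : Int) :
    srA threshold mc l idx 0 = srB threshold mc l idx := by
  induction hn : l.length using Nat.strong_induction_on generalizing l idx with
  | _ n ih =>
  match l with
  | [] => simp [srA, srB]
  | v :: rest =>
    by_cases hv : v ≥ threshold
    · have hk1 : 1 ≤ runLen threshold (v :: rest) := by simp [runLen, hv]
      by_cases hbig : (runLen threshold (v :: rest) : Int) ≥ mc
      · rw [srB]; simp only [dif_pos hv, if_pos hbig]
        rw [srA_hit threshold mc (v :: rest) idx 0 (by omega) (by omega)]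
        congr 1; omega
      · have hmcl : (runLen threshold (v :: rest) : Int) < mc := lt_of_not_ge hbig
        rw [srA_skip threshold mc (v :: rest) idx 0 le_rfl (by omega)]
        rw [srB]; simp only [dif_pos hv, if_neg hbig]
        exact ih ((v :: rest).drop (runLen threshold (v :: rest))).length
          (by subst hn; simp only [List.length_drop, List.length_cons]; omega) _ _ rfl
    · simp only [srA, if_neg hv]
      rw [srB]; simp only [dif_neg hv]
      exact ih rest.length (by subst hn; simp) _ _ rfl

-- with no qualifying element both loops fall through to none
theorem srA_none (threshold mc : Int) (l : List Int) (idx count : Int)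
    (h : ∀ y ∈ l, ¬ y ≥ threshold) : srA threshold mc l idx count = none := by
  induction l generalizing idx count with
  | nil => simp [srA]
  | cons v rest ih =>
    have hv : ¬ v ≥ threshold := h v (by simp)
    simp only [srA, if_neg hv]
    exact ih _ _ (fun y hy => h y (by simp [hy]))

theorem srB_none (threshold mc : Int) (l : List Int) (idx : Int)
    (h : ∀ y ∈ l, ¬ y ≥ threshold) : srB threshold mc l idx = none := by
  induction l generalizing idx with
  | nil => simp [srB]
  | cons v rest ih =>
    have hv : ¬ v ≥ threshold := h v (by simp)
    rw [srB]; simp only [dif_neg hv]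
    exact ih _ (fun y hy => h y (by simp [hy]))

-- inside D_: A fires at the first qualifying index f with value idx+f+1-mc, B returns idx+f
theorem srAB_diff (threshold mc : Int) (hmc : mc ≤ 0) (l : List Int) (idx : Int)
    (h : ∃ y ∈ l, y ≥ threshold) :
    ∃ f : Int, srA threshold mc l idx 0 = some (idx + f + 1 - mc) ∧
      srB threshold mc l idx = some (idx + f) := by
  induction l generalizing idx with
  | nil => simp at h
  | cons v rest ih =>
    by_cases hv : v ≥ threshold
    · refine ⟨0, ?_, ?_⟩
      · simp only [srA, if_pos hv, if_pos (show (0:Int) + 1 ≥ mc by omega)]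
        congr 1; omega
      · have hk1 : 1 ≤ runLen threshold (v :: rest) := by simp [runLen, hv]
        rw [srB]
        simp only [dif_pos hv, if_pos (show ((runLen threshold (v :: rest) : Int)) ≥ mc by omega)]
        congr 1; omega
    · have h' : ∃ y ∈ rest, y ≥ threshold := by
        rcases h with ⟨y, hy, hge⟩
        rcases List.mem_cons.mp hy with rfl | hy' 
        · exact absurd hge hv
        · exact ⟨y, hy', hge⟩
      rcases ih (idx + 1) h' with ⟨f, hA, hB⟩
      refine ⟨f + 1, ?_, ?_⟩
      · simp only [srA, if_neg hv]; rw [hA]; congr 1; omega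
      · rw [srB]; simp only [dif_neg hv]; rw [hB]; congr 1; omega

-- ===== VERDICT =====
theorem sustained_rise_index_spec : Claim_unchanged_sustained_rise_index := by
  intro ydata threshold mc _
  unfold Spec_sustained_rise_index sustained_rise_index sustained_rise_index_alt
  intro hnd
  by_cases hmc : 1 ≤ mc
  · exact srA_eq_srB threshold mc hmc ydata 0
  · have hno : ∀ y ∈ ydata, ¬ y ≥ threshold := by
      intro y hy hge
      exact hnd ⟨by omega, y, hy, hge⟩
    rw [srA_none threshold mc ydata 0 0 hno, srB_none threshold mc ydata 0 hno]

theorem sustained_rise_index_changed : Claim_changed_sustained_rise_index := by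
  unfold Claim_changed_sustained_rise_index
  refine ⟨by decide, by decide, by decide, ?_, by decide⟩
  show sustained_rise_index_alt [5] 0 0 = some 0
  unfold sustained_rise_index_alt
  rw [srB]; norm_num [runLen]

theorem sustained_rise_index_tight : Claim_exact_sustained_rise_index := by
  intro ydata threshold mc _ hd
  rcases hd with ⟨hmc, hex⟩
  rcases srAB_diff threshold mc hmc ydata 0 hex with ⟨f, hA, hB⟩
  unfold sustained_rise_index sustained_rise_index_alt
  rw [hA, hB]
  intro h
  have := Option.some.inj h
  omega
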